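-- pv_equiv track=rewrite | github.com/MarcoGDallAlba/Progetti | Divisione per tre,sette.py | Div3
-- ===== SOURCE A (Python) =====
-- def Div3(n):
--     if n<0:
--         n=-n
--     t=[0,3,6,9]
--     if n<10:
--         return n in t
--     else:
--         n=str(n)
--         t=[int(c) for c in n]
--         return Div3(sum(t))
-- ===== SOURCE B (Python) =====
-- def Div3(n):
--     return n % 3 == 0
-- ===== Notes on version B (the rewrite author's own statement) =====
-- stated objective: simpler
-- what changed: Replaces the recursive string/digit-sum traversal with the closed-form arithmetic divisibility test using the modulus operator.
import Mathlib
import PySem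

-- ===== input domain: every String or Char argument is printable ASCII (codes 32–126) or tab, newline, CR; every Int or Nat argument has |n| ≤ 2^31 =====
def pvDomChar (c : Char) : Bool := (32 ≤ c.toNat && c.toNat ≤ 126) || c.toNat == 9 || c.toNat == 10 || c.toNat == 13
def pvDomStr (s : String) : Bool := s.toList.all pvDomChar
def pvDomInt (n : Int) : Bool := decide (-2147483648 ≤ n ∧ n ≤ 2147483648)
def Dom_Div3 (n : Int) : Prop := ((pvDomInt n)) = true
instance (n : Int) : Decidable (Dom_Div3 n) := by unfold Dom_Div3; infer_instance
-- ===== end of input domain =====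

-- B replaces A's recursive string/digit-sum divisibility test with the closed form n % 3 == 0.

-- ===== PORT A =====
-- Facts the port's decreasing_by cites: Nat.toDigits lists the base-10 digits
-- (reversed), and the digit sum of a number >= 10 is strictly smaller than it.
lemma pvDigitsSumLe (n : Nat) : (Nat.digits 10 n).sum ≤ n := by
  induction n using Nat.strong_induction_on with
  | _ n ih =>
    rcases Nat.eq_zero_or_pos n with h | h
    · simp [h]
    · rw [Nat.digits_def' (by norm_num : 1 < 10) h]
      simp only [List.sum_cons]
      have h1 : n / 10 < n := Nat.div_lt_self h (by norm_num)
      have := ih (n / 10) h1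
      omega

lemma pvDigitsSumLt (n : Nat) (h : 10 ≤ n) : (Nat.digits 10 n).sum < n := by
  rw [Nat.digits_def' (by norm_num : 1 < 10) (by omega)]
  simp only [List.sum_cons]
  have h1 : n / 10 < n := Nat.div_lt_self (by omega) (by norm_num)
  have h2 : 1 ≤ n / 10 := (Nat.le_div_iff_mul_le (by norm_num)).mpr (by omega)
  have := pvDigitsSumLe (n / 10)
  omega

lemma pvToDigitsCoreEq (fuel : Nat) : ∀ (n : Nat) (acc : List Char), 0 < n → n < 10 ^ fuel →
    Nat.toDigitsCore 10 fuel n acc = ((Nat.digits 10 n).map Nat.digitChar).reverse ++ acc := by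
  induction fuel with
  | zero => intro n acc h0 h; omega
  | succ f ih =>
    intro n acc h0 h
    rw [Nat.toDigitsCore]
    by_cases hz : n / 10 = 0
    · have hlt : n < 10 := by omega
      rw [if_pos hz, Nat.digits_def' (by norm_num : 1 < 10) h0]
      simp [hz, Nat.mod_eq_of_lt hlt]
    · rw [if_neg hz, ih (n / 10) _ (by omega) (by
        have : n / 10 < 10 ^ f := by
          rw [Nat.div_lt_iff_lt_mul (show 0 < 10 by norm_num)]
          calc n < 10 ^ (f + 1) := h
            _ = 10 ^ f * 10 := by ring
        exact this)]
      rw [Nat.digits_def' (by norm_num : 1 < 10) h0]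
      simp

lemma pvToDigitsEq (n : Nat) (h : 0 < n) :
    Nat.toDigits 10 n = ((Nat.digits 10 n).map Nat.digitChar).reverse := by
  have hb : n < 10 ^ (n + 1) := by
    calc n < 2 ^ (n + 1) := Nat.lt_two_pow_self.trans (Nat.pow_lt_pow_right (by norm_num) (Nat.lt_succ_self n))
      _ ≤ 10 ^ (n + 1) := Nat.pow_le_pow_left (by norm_num) _
  simpa using pvToDigitsCoreEq (n + 1) n [] h hb

lemma pvDigitValDigitChar (d : Nat) (h : d < 10) :
    (PySem.Int.ofChars? [Nat.digitChar d]).getD 0 = (d : Int) := by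
  interval_cases d <;> decide

lemma pvCharSumEq (m : Nat) (h : 0 < m) :
    ((PySem.Int.toChars (m : Int)).map (fun c => (PySem.Int.ofChars? [c]).getD 0)).sum
      = ((Nat.digits 10 m).sum : Int) := by
  have h1 : PySem.Int.toChars (m : Int) = Nat.toDigits 10 m := by
    simp [PySem.Int.toChars]
  rw [h1, pvToDigitsEq m h, List.map_reverse, List.sum_reverse, List.map_map]
  have h2 : ((Nat.digits 10 m).map ((fun c => (PySem.Int.ofChars? [c]).getD 0) ∘ Nat.digitChar))
      = (Nat.digits 10 m).map (Nat.cast : Nat → Int) := by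
    apply List.map_congr_left
    intro d hd
    exact pvDigitValDigitChar d (Nat.digits_lt_base (by norm_num) hd)
  rw [h2, Nat.cast_list_sum]

def Div3 (n : Int) : Bool :=
  let m := if n < 0 then -n else n
  let t : List Int := [0, 3, 6, 9]
  if h : m < 10 then t.contains m
  else
    let s := PySem.Int.toChars m
    let t2 := s.map (fun c => (PySem.Int.ofChars? [c]).getD 0)
    Div3 t2.sum
termination_by n.natAbs
decreasing_by
  simp only [m] at h ⊢
  have hm : (if h : n < 0 then -n else n : Int) = (n.natAbs : Int) := by split <;> omega
  rw [hm] at h ⊢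
  rw [pvCharSumEq n.natAbs (by omega), Int.natAbs_natCast]
  exact pvDigitsSumLt n.natAbs (by omega)

-- ===== PORT B =====
-- B, transliterated: n % 3 == 0 (Python %, floor semantics).
def Div3_alt (n : Int) : Bool := PySem.Int.mod n 3 == 0

-- ===== PRECONDITION & SPEC =====
def Spec_Div3 (n : Int) (out : Bool) : Prop := out = Div3_alt n
instance (n : Int) (out : Bool) : Decidable (Spec_Div3 n out) := by unfold Spec_Div3; infer_instance

-- ===== CLAIM (what is proved, stated in full; the proofs are below) =====
def Claim_equal_Div3 : Prop := ∀ (n : Int), Dom_Div3 n → Spec_Div3 n (Div3 n)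

-- ===== LEMMAS AND PROOFS =====
lemma pvDiv3Mod (n : Int) : Div3 n = Div3_alt n := by
  fun_induction Div3 n with
  | case1 n m t h =>
    unfold Div3_alt
    have hb : -10 < n ∧ n < 10 := by simp only [m] at h; split at h <;> omega
    obtain ⟨h1, h2⟩ := hb
    simp only [t, m]
    interval_cases n <;> rfl
  | case2 n m hlt cs ds ih =>
    unfold Div3_alt at ih ⊢
    rw [ih]
    have hm : m = (n.natAbs : Int) := by simp only [m]; split <;> omega
    rw [hm] at hlt
    have hsum : ds.sum = ((Nat.digits 10 n.natAbs).sum : Int) := by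
      simp only [ds, cs, hm]
      exact pvCharSumEq n.natAbs (by omega)
    rw [hsum, Bool.eq_iff_iff]
    simp only [beq_iff_eq, PySem.Int.mod_eq_zero_iff_dvd]
    rw [show ((3:Int)) = ((3:Nat):Int) from rfl, Int.natCast_dvd_natCast, ← Nat.three_dvd_iff]
    simpa using Int.natAbs_dvd_natAbs (a := (3:Int)) (b := n)

-- ===== VERDICT (by name: the statement is the Claim_ definition above) =====
theorem Div3_spec : Claim_equal_Div3 := by
  intro n _
  exact pvDiv3Mod n
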